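-- pv_equiv track=rewrite | github.com/mailgyc/doudizhu | core/rule.py | _to_pokers
-- ===== SOURCE A (Python) =====
-- def _to_poker(card):
--     if card == 'W':
--         return [52]
--     if card == 'w':
--         return [53]
--
--     cards = 'A234567890JQK'
--     for i, c in enumerate(cards):
--         if c == card:
--             return [i, i + 13, i + 13*2, i + 13*3]
--     return [54]
--
-- def _to_pokers(hand_pokers, cards):
--     pokers = []
--     for card in cards:
--         candidates = _to_poker(card)
--         for cd in candidates:
--             if cd in hand_pokers and cd not in pokers:
--                 pokers.append(cd)
--                 break
--     return pokers
-- ===== SOURCE B (Python) =====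
-- def _to_pokers(hand_pokers, cards):
--     # Index the hand once: for each code (rank 0-12, joker 52/53, fall-through 54)
--     # the pool of available ids, in candidate order; popping a pool gives the
--     # next unused matching id directly.
--     hand = set(hand_pokers)
--     pools = {k: [v for v in (k, k + 13, k + 26, k + 39) if v in hand] for k in range(13)}
--     for k in (52, 53, 54):
--         pools[k] = [k] if k in hand else []
--     order = 'A234567890JQK'
--     pokers = []
--     for card in cards:
--         if card == 'W':
--             code = 52
--         elif card == 'w':
--             code = 53
--         else:
--             code = next((i for i, c in enumerate(order) if c == card), 54)
--         pool = pools[code]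
--         if pool:
--             pokers.append(pool.pop(0))
--     return pokers
-- ===== Notes on version B (the rewrite author's own statement) =====
-- stated objective: faster
-- what changed: B indexes the hand once into per-code pools (rank 0-12 plus 52/53/54) and pops the next available id per card, replacing A's per-card candidate scan with membership tests over hand_pokers and the growing result list.
import Mathlib
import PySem

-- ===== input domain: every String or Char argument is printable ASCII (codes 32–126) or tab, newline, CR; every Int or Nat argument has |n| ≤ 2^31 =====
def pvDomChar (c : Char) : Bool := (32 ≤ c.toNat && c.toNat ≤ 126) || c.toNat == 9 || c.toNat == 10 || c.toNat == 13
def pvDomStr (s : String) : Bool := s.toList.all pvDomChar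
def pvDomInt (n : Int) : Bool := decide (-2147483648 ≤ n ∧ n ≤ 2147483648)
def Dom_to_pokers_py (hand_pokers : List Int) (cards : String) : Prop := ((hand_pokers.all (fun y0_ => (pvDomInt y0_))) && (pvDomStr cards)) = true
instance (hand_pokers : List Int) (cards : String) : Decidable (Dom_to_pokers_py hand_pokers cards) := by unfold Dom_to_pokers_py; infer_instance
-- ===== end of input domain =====

-- B replaces A's per-card scans of hand_pokers and the result list by a per-code pool index
-- of the hand built once, popping the next available id per card (idiomatic re-implementation).

-- ===== PORT A =====
-- the 'for i, c in enumerate(cards)' loop of _to_poker, with its early return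
def toPokerLoop (l : List (Int × Char)) (card : Char) : List Int :=
  match l with
  | [] => [54]
  | (i, c) :: rest => if c = card then [i, i + 13, i + 13*2, i + 13*3] else toPokerLoop rest card

def to_poker (card : Char) : List Int :=
  if card = 'W' then [52]
  else if card = 'w' then [53]
  else toPokerLoop (PySem.List.enumerate "A234567890JQK".toList) card

-- the 'for cd in candidates' loop with its break
def pickLoop (cand : List Int) (hand_pokers pokers : List Int) : List Int :=
  match cand with
  | [] => pokers
  | cd :: rest =>
    if cd ∈ hand_pokers ∧ cd ∉ pokers then pokers ++ [cd] else pickLoop rest hand_pokers pokers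

def to_pokers_py (hand_pokers : List Int) (cards : String) : List Int :=
  cards.toList.foldl (fun pokers card => pickLoop (to_poker card) hand_pokers pokers) []

-- ===== PORT B =====
-- 'code = next((i for i, c in enumerate(order) if c == card), 54)'
def altCodeLoop (l : List (Int × Char)) (card : Char) : Int :=
  match l with
  | [] => 54
  | (i, c) :: rest => if c = card then i else altCodeLoop rest card

def altCode (card : Char) : Int :=
  if card = 'W' then 52
  else if card = 'w' then 53
  else altCodeLoop (PySem.List.enumerate "A234567890JQK".toList) card

-- the dict comprehension over range(13), then the three special keys
def altPools (hand : PySem.Set Int) : PySem.Dict Int (List Int) :=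
  let d := (PySem.List.pyRange 0 13 1).foldl
    (fun d k => d.insert k (([k, k + 13, k + 26, k + 39]).filter (fun v => PySem.Set.contains hand v)))
    PySem.Dict.empty
  ([52, 53, 54] : List Int).foldl
    (fun d k => d.insert k (if PySem.Set.contains hand k then [k] else [])) d

-- one iteration of the 'for card in cards' loop; pools[code] is exact via getD
-- because every reachable code (0-12, 52, 53, 54) is a key of altPools
def altStep (st : PySem.Dict Int (List Int) × List Int) (card : Char) :
    PySem.Dict Int (List Int) × List Int :=
  match st.1.getD (altCode card) [] with
  | [] => st
  | h :: t => (st.1.insert (altCode card) t, st.2 ++ [h])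

def to_pokers_py_alt (hand_pokers : List Int) (cards : String) : List Int :=
  (cards.toList.foldl altStep (altPools (PySem.Set.ofList hand_pokers), [])).2

-- ===== PRECONDITION & SPEC =====
def Spec_to_pokers_py (hand_pokers : List Int) (cards : String) (out : List Int) : Prop := out = to_pokers_py_alt hand_pokers cards
instance (hand_pokers : List Int) (cards : String) (out : List Int) : Decidable (Spec_to_pokers_py hand_pokers cards out) := by unfold Spec_to_pokers_py; infer_instance

-- ===== CLAIM (what is proved, stated in full; the proofs are below) =====
def Claim_equal_to_pokers_py : Prop := ∀ (hand_pokers : List Int) (cards : String), Dom_to_pokers_py hand_pokers cards → Spec_to_pokers_py hand_pokers cards (to_pokers_py hand_pokers cards)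

-- ===== LEMMAS AND PROOFS =====

-- the candidate list of a code
def cands (code : Int) : List Int :=
  if code = 52 ∨ code = 53 ∨ code = 54 then [code] else [code, code + 13, code + 26, code + 39]

-- the pool B keeps for a code, as a function of A's state
def Fpool (hand pokers : List Int) (code : Int) : List Int :=
  (cands code).filter (fun v => decide (v ∈ hand) && !decide (v ∈ pokers))

lemma altCodeLoop_range (card : Char) :
    ∀ l : List (Int × Char), (∀ p ∈ l, 0 ≤ p.1 ∧ p.1 ≤ 12) →
      altCodeLoop l card = 54 ∨ (0 ≤ altCodeLoop l card ∧ altCodeLoop l card ≤ 12) := by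
  intro l
  induction l with
  | nil => intro _; left; rfl
  | cons p rest ih =>
    intro h
    obtain ⟨i, c⟩ := p
    have hi : 0 ≤ i ∧ i ≤ 12 := h (i, c) (by simp)
    simp only [altCodeLoop]
    split_ifs with hc
    · right; exact hi
    · exact ih (fun q hq => h q (by simp [hq]))

lemma enum_range : ∀ p ∈ PySem.List.enumerate "A234567890JQK".toList, 0 ≤ p.1 ∧ p.1 ≤ 12 := by
  decide

lemma altCode_range (card : Char) :
    altCode card = 52 ∨ altCode card = 53 ∨ altCode card = 54 ∨
      (0 ≤ altCode card ∧ altCode card ≤ 12) := by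
  unfold altCode
  split_ifs with h1 h2
  · left; rfl
  · right; left; rfl
  · rcases altCodeLoop_range card _ enum_range with h | h
    · right; right; left; exact h
    · right; right; right; exact h

lemma to_poker_eq_cands_loop (card : Char) :
    ∀ l : List (Int × Char), (∀ p ∈ l, 0 ≤ p.1 ∧ p.1 ≤ 12) →
      toPokerLoop l card = cands (altCodeLoop l card) := by
  intro l
  induction l with
  | nil => intro _; simp [toPokerLoop, altCodeLoop, cands]
  | cons p rest ih =>
    intro h
    obtain ⟨i, c⟩ := p
    have hi : 0 ≤ i ∧ i ≤ 12 := h (i, c) (by simp)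
    simp only [toPokerLoop, altCodeLoop]
    split_ifs with hc
    · unfold cands
      rw [if_neg (by omega)]
      norm_num
    · exact ih (fun q hq => h q (by simp [hq]))

lemma to_poker_eq_cands (card : Char) : to_poker card = cands (altCode card) := by
  unfold to_poker altCode
  split_ifs with h1 h2
  · simp [cands]
  · simp [cands]
  · exact to_poker_eq_cands_loop card _ enum_range

lemma nodup_cands (code : Int) : (cands code).Nodup := by
  unfold cands
  split_ifs with h
  · simp
  · refine List.nodup_cons.mpr ⟨?_, List.nodup_cons.mpr ⟨?_, List.nodup_cons.mpr
      ⟨?_, List.nodup_singleton _⟩⟩⟩ <;> simp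

lemma mem_cands {code x : Int} (hx : x ∈ cands code) :
    x = code ∨ x = code + 13 ∨ x = code + 26 ∨ x = code + 39 := by
  unfold cands at hx
  split_ifs at hx with h
  · simp at hx; tauto
  · simp at hx; tauto

lemma cands_disjoint {a b x : Int}
    (ha : a = 52 ∨ a = 53 ∨ a = 54 ∨ (0 ≤ a ∧ a ≤ 12))
    (hb : b = 52 ∨ b = 53 ∨ b = 54 ∨ (0 ≤ b ∧ b ≤ 12))
    (hxa : x ∈ cands a) (hxb : x ∈ cands b) : a = b := by
  have h1 := mem_cands hxa
  have h2 := mem_cands hxb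
  omega

-- A's inner loop returns the head of the filtered candidate list, appended
lemma pickLoop_eq (cand hand pokers : List Int) :
    pickLoop cand hand pokers =
      match cand.filter (fun v => decide (v ∈ hand) && !decide (v ∈ pokers)) with
      | [] => pokers
      | h :: _ => pokers ++ [h] := by
  induction cand with
  | nil => rfl
  | cons cd rest ih =>
    simp only [pickLoop, List.filter_cons]
    by_cases h : cd ∈ hand ∧ cd ∉ pokers
    · rw [if_pos h]
      have hb : (decide (cd ∈ hand) && !decide (cd ∈ pokers)) = true := by
        simp [h.1, h.2]
      rw [hb]
      rfl
    · rw [if_neg h]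
      have hb : (decide (cd ∈ hand) && !decide (cd ∈ pokers)) = false := by
        by_contra hc
        simp only [Bool.not_eq_false, Bool.and_eq_true, decide_eq_true_eq,
          Bool.not_eq_true', decide_eq_false_iff_not] at hc
        exact h hc
      rw [hb, ih]
      simp

-- getD of a fold of inserts of f over a key list
lemma getD_foldl_insert_fn (keys : List Int) (f : Int → List Int)
    (d : PySem.Dict Int (List Int)) (k : Int) :
    (keys.foldl (fun d k' => d.insert k' (f k')) d).getD k [] =
      if k ∈ keys then f k else d.getD k [] := by
  induction keys generalizing d with
  | nil => simp
  | cons k0 rest ih =>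
    simp only [List.foldl_cons, ih, List.mem_cons]
    by_cases hk : k ∈ rest
    · rw [if_pos hk, if_pos (Or.inr hk)]
    · rw [if_neg hk]
      by_cases hk0 : k = k0
      · rw [if_pos (Or.inl hk0), PySem.Dict.getD_insert, if_pos hk0, hk0]
      · rw [if_neg (by tauto), PySem.Dict.getD_insert, if_neg hk0]

-- the initial pools realize Fpool with no id used yet
lemma altPools_getD (hand : List Int) (card : Char) :
    (altPools (PySem.Set.ofList hand)).getD (altCode card) [] =
      Fpool hand [] (altCode card) := by
  unfold altPools
  rw [getD_foldl_insert_fn, getD_foldl_insert_fn]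
  have hcontains : ∀ v : Int,
      PySem.Set.contains (PySem.Set.ofList hand) v = decide (v ∈ hand) := by
    intro v; simp [pysem]
  rcases altCode_range card with h | h | h | h
  · rw [h, if_pos (show (52 : Int) ∈ [52, 53, 54] by norm_num), hcontains]
    unfold Fpool cands
    by_cases h52 : (52 : Int) ∈ hand <;> simp [h52]
  · rw [h, if_pos (show (53 : Int) ∈ [52, 53, 54] by norm_num), hcontains]
    unfold Fpool cands
    by_cases h53 : (53 : Int) ∈ hand <;> simp [h53]
  · rw [h, if_pos (show (54 : Int) ∈ [52, 53, 54] by norm_num), hcontains]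
    unfold Fpool cands
    by_cases h54 : (54 : Int) ∈ hand <;> simp [h54]
  · have hns : altCode card ∉ ([52, 53, 54] : List Int) := by
      intro hmem'; simp at hmem'; omega
    have hin : altCode card ∈ PySem.List.pyRange 0 13 1 := by
      rw [PySem.List.mem_pyRange_one]; omega
    rw [if_neg hns, if_pos hin]
    unfold Fpool cands
    rw [if_neg (by omega)]
    simp only [hcontains]
    simp

lemma Fpool_after_pop (hand pokers : List Int) (code h : Int) (t : List Int)
    (hF : Fpool hand pokers code = h :: t) :
    Fpool hand (pokers ++ [h]) code = t := by
  have hnodup : (Fpool hand pokers code).Nodup := List.Nodup.filter _ (nodup_cands code)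
  rw [hF] at hnodup
  have hht : h ∉ t := (List.nodup_cons.mp hnodup).1
  have hstep : Fpool hand (pokers ++ [h]) code =
      (Fpool hand pokers code).filter (fun v => !decide (v = h)) := by
    unfold Fpool
    rw [List.filter_filter]
    apply List.filter_congr
    intro v _
    by_cases h1 : v ∈ hand <;> by_cases h2 : v ∈ pokers <;> by_cases h3 : v = h <;>
      simp [h1, h2, h3]
  rw [hstep, hF, List.filter_cons]
  simp only [decide_true, Bool.not_true, Bool.false_eq_true, if_false]
  rw [List.filter_eq_self.mpr]
  intro v hv
  simp only [Bool.not_eq_eq_eq_not, Bool.not_true, decide_eq_false_iff_not]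
  intro hvh; exact hht (hvh ▸ hv)

lemma Fpool_other (hand pokers : List Int) (c c' h : Int)
    (hc : c = 52 ∨ c = 53 ∨ c = 54 ∨ (0 ≤ c ∧ c ≤ 12))
    (hc' : c' = 52 ∨ c' = 53 ∨ c' = 54 ∨ (0 ≤ c' ∧ c' ≤ 12))
    (hne : c' ≠ c) (hh : h ∈ cands c) :
    Fpool hand (pokers ++ [h]) c' = Fpool hand pokers c' := by
  unfold Fpool
  apply List.filter_congr
  intro v hv
  have hvh : v ≠ h := by
    intro he
    exact hne (cands_disjoint hc' hc (he ▸ hv) hh)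
  by_cases h1 : v ∈ hand <;> by_cases h2 : v ∈ pokers <;>
    simp [h1, h2, hvh]

lemma altStep_eq (pools : PySem.Dict Int (List Int)) (pokers : List Int) (card : Char) :
    altStep (pools, pokers) card =
      match pools.getD (altCode card) [] with
      | [] => (pools, pokers)
      | h :: t => (pools.insert (altCode card) t, pokers ++ [h]) := rfl

-- the loop invariant: B's pools realize Fpool of A's current result list
lemma main_loop (hand : List Int) :
    ∀ (cs : List Char) (pools : PySem.Dict Int (List Int)) (pokers : List Int),
      (∀ card : Char, pools.getD (altCode card) [] = Fpool hand pokers (altCode card)) →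
      cs.foldl (fun pokers card => pickLoop (to_poker card) hand pokers) pokers =
        (cs.foldl altStep (pools, pokers)).2 := by
  intro cs
  induction cs with
  | nil => intro pools pokers _; rfl
  | cons card rest ih =>
    intro pools pokers hinv
    simp only [List.foldl_cons]
    have hstepA : pickLoop (to_poker card) hand pokers =
        match Fpool hand pokers (altCode card) with
        | [] => pokers
        | h :: _ => pokers ++ [h] := by
      rw [pickLoop_eq, to_poker_eq_cands]; rfl
    have hpool := hinv card
    cases hFc : Fpool hand pokers (altCode card) with
    | nil =>
      have hB : altStep (pools, pokers) card = (pools, pokers) := by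
        rw [altStep_eq, hpool, hFc]
      rw [hstepA, hFc, hB]
      exact ih pools pokers hinv
    | cons h t =>
      have hB : altStep (pools, pokers) card =
          (pools.insert (altCode card) t, pokers ++ [h]) := by
        rw [altStep_eq, hpool, hFc]
      rw [hstepA, hFc, hB]
      apply ih
      intro card'
      rw [PySem.Dict.getD_insert]
      by_cases hcc : altCode card' = altCode card
      · rw [if_pos hcc, hcc, Fpool_after_pop hand pokers _ h t hFc]
      · rw [if_neg hcc, hinv card',
          Fpool_other hand pokers (altCode card) (altCode card') h
            (altCode_range card) (altCode_range card') hcc]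
        have hhm : h ∈ Fpool hand pokers (altCode card) := by rw [hFc]; simp
        exact List.mem_of_mem_filter hhm

-- ===== VERDICT (by name: the statement is the Claim_ definition above) =====
theorem to_pokers_py_spec : Claim_equal_to_pokers_py := by
  intro hand_pokers cards _
  unfold Spec_to_pokers_py to_pokers_py to_pokers_py_alt
  exact main_loop hand_pokers cards.toList _ [] (fun card => altPools_getD hand_pokers card)
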